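-- pv_equiv track=rewrite | github.com/DenizSungurtekin/Cryptography-and-security | Galois Counter Mode/Correc_TP1_AES.py | MessageToMatrix
-- ===== SOURCE A (Python) =====
-- def MessageToMatrix(string):
--     longueur = len(string)
--     matrice = []
--     for i in range(longueur):
--         byte = ord(string[i])
--         if i % 4 == 0:
--             matrice.append([byte])
--         else:
--             matrice[-1].append(byte)
--     return matrice
-- ===== SOURCE B (Python) =====
-- def MessageToMatrix(string):
--     return [[ord(c) for c in string[i:i+4]] for i in range(0, len(string), 4)]
-- ===== Notes on version B (the rewrite author's own statement) =====
-- stated objective: idiomatic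
-- what changed: B slices the string into consecutive 4-character chunks and builds each row fresh in one comprehension, instead of A's index-modulo loop that appends into the previously built last row.
import Mathlib
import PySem

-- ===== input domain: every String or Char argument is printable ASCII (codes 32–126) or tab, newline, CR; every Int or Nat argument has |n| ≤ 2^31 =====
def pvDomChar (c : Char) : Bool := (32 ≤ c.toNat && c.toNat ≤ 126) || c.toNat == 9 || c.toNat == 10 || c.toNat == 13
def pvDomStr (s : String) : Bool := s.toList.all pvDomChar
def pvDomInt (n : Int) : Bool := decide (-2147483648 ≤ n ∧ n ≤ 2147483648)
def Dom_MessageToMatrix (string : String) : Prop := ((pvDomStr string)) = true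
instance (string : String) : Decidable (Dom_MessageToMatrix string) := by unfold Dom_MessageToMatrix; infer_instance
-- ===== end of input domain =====

-- B groups ord-values by slicing consecutive 4-char chunks instead of A's index-modulo append-to-last-row loop (idiomatic).

-- ===== PORT A =====
-- matrice[-1].append(byte): append to the last row (m is never [] when this runs, since i=0 appended a row)
def pvAppendLast (m : List (List Int)) (b : Int) : List (List Int) :=
  match m with
  | [] => []
  | [r] => [r ++ [b]]
  | r :: rs => r :: pvAppendLast rs b

-- the 'for i in range(longueur)' loop with the running index i and matrice as state
def pvLoopA (i : Nat) (cs : List Char) (m : List (List Int)) : List (List Int) :=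
  match cs with
  | [] => m
  | c :: rest =>
      let byte : Int := (c.toNat : Int)
      if i % 4 = 0 then pvLoopA (i + 1) rest (m ++ [[byte]])
      else pvLoopA (i + 1) rest (pvAppendLast m byte)

def MessageToMatrix (string : String) : List (List Int) :=
  pvLoopA 0 string.toList []

-- ===== PORT B =====
-- one row per slice string[i:i+4], i = 0, 4, 8, …
def pvChunks4 : List Char → List (List Int)
  | [] => []
  | c :: cs => ((c :: cs.take 3).map (fun ch => (ch.toNat : Int))) :: pvChunks4 (cs.drop 3)
  termination_by cs => cs.length
  decreasing_by simp

def MessageToMatrix_alt (string : String) : List (List Int) :=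
  pvChunks4 string.toList

-- ===== PRECONDITION & SPEC =====
def Spec_MessageToMatrix (string : String) (out : List (List Int)) : Prop := out = MessageToMatrix_alt string
instance (string : String) (out : List (List Int)) : Decidable (Spec_MessageToMatrix string out) := by unfold Spec_MessageToMatrix; infer_instance

-- ===== CLAIM (what is proved, stated in full; the proofs are below) =====
def Claim_equal_MessageToMatrix : Prop := ∀ (string : String), Dom_MessageToMatrix string → Spec_MessageToMatrix string (MessageToMatrix string)

-- ===== LEMMAS AND PROOFS =====

theorem pvChunks4_nil : pvChunks4 [] = [] := by rw [pvChunks4]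

theorem pvChunks4_cons (c : Char) (cs : List Char) :
    pvChunks4 (c :: cs) = ((c :: cs.take 3).map (fun ch => (ch.toNat : Int))) :: pvChunks4 (cs.drop 3) := by
  rw [pvChunks4]

theorem pvAppendLast_append (m : List (List Int)) (r : List Int) (b : Int) :
    pvAppendLast (m ++ [r]) b = m ++ [r ++ [b]] := by
  induction m with
  | nil => rfl
  | cons x xs ih =>
      cases xs with
      | nil => simp [pvAppendLast]
      | cons y ys => simpa [pvAppendLast] using ih

theorem pvLoopA_chunk : ∀ (n : Nat) (cs : List Char), cs.length ≤ n →
    ∀ (m : List (List Int)) (i : Nat), i % 4 = 0 →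
    pvLoopA i cs m = m ++ pvChunks4 cs := by
  intro n
  induction n with
  | zero =>
      intro cs h m i hi
      have : cs = [] := List.length_eq_zero_iff.mp (Nat.le_zero.mp h)
      subst this; simp [pvLoopA, pvChunks4_nil]
  | succ n ih =>
      intro cs h m i hi
      match cs with
      | [] => simp [pvLoopA, pvChunks4_nil]
      | [c1] =>
          simp [pvLoopA, hi, pvChunks4_nil, pvChunks4_cons]
      | [c1, c2] =>
          have h1 : (i + 1) % 4 ≠ 0 := by omega
          simp [pvLoopA, hi, h1, pvAppendLast_append, pvChunks4_nil, pvChunks4_cons]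
      | [c1, c2, c3] =>
          have h1 : (i + 1) % 4 ≠ 0 := by omega
          have h2 : (i + 1 + 1) % 4 ≠ 0 := by omega
          simp [pvLoopA, hi, h1, h2, pvAppendLast_append, pvChunks4_nil, pvChunks4_cons]
      | c1 :: c2 :: c3 :: c4 :: rest =>
          have h1 : (i + 1) % 4 ≠ 0 := by omega
          have h2 : (i + 1 + 1) % 4 ≠ 0 := by omega
          have h3 : (i + 1 + 1 + 1) % 4 ≠ 0 := by omega
          have h4 : (i + 1 + 1 + 1 + 1) % 4 = 0 := by omega
          have hlen : rest.length ≤ n := by simp at h; omega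
          rw [show pvLoopA i (c1 :: c2 :: c3 :: c4 :: rest) m
              = pvLoopA (i + 1 + 1 + 1 + 1) rest
                  (m ++ [[(c1.toNat : Int), (c2.toNat : Int), (c3.toNat : Int), (c4.toNat : Int)]]) by
            simp [pvLoopA, hi, h1, h2, h3, pvAppendLast_append]]
          rw [ih rest hlen _ _ h4]
          simp [pvChunks4_cons]

-- ===== VERDICT (by name: the statement is the Claim_ definition above) =====
theorem MessageToMatrix_spec : Claim_equal_MessageToMatrix := by
  intro s _
  show MessageToMatrix s = MessageToMatrix_alt s
  simpa [MessageToMatrix, MessageToMatrix_alt] using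
    pvLoopA_chunk s.toList.length s.toList le_rfl [] 0 rfl
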